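-- pv_equiv track=rewrite | github.com/Kokorick26/puzzle_solver | prediction.py | tile_rule
-- ===== SOURCE A (Python) =====
-- def tile_rule(input_grid):
--     grid_height = len(input_grid)
--     grid_width = len(input_grid[0])
--
--     out_height = grid_height * 3
--     out_width = grid_width * 3
--     out = [[0] * out_width for _ in range(out_height)]
--
--     for i in range(grid_height):
--         for j in range(grid_width):
--             if input_grid[i][j] != 0:
--                 for di in range(grid_height):
--                     for dj in range(grid_width):
--                         out[grid_height * i + di][grid_width * j + dj] = input_grid[di][dj]
--     return out
-- ===== SOURCE B (Python) =====
-- def tile_rule(input_grid):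
--     H = len(input_grid)
--     W = len(input_grid[0])
--     return [
--         [input_grid[r % H][c % W]
--          if r // H < H and c // W < W and input_grid[r // H][c // W] != 0
--          else 0
--          for c in range(3 * W)]
--         for r in range(3 * H)
--     ]
-- ===== Notes on version B (the rewrite author's own statement) =====
-- stated objective: alternative
-- what changed: B builds the 3Hx3W output with a pull rule, computing each output cell once from (r//H, c//W, r%H, c%W), instead of A's push approach of allocating a zero grid and copying a whole HxW block for every nonzero input cell.
import Mathlib
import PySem

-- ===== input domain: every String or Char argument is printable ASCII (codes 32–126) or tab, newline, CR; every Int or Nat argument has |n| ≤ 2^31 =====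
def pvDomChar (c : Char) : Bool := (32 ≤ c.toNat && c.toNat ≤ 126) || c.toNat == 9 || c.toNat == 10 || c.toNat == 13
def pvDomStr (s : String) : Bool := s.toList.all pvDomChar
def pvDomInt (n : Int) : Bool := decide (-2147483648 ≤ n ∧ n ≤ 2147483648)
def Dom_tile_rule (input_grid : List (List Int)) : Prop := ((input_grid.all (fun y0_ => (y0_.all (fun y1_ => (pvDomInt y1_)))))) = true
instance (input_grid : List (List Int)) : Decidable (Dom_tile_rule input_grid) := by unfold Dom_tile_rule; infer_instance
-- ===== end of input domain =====

-- B rebuilds the output by a pull (per-output-cell) rule instead of A's push (copy a block per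
-- nonzero input cell) writes; same values, alternative decomposition.

-- ===== PORT A =====
-- Python 2-D reads `g[i][j]`: inside Pre_ the indices are in range, so getD with defaults is exact there.
def pvGet2 (g : List (List Int)) (i j : Nat) : Int := (g.getD i []).getD j 0
-- Python `out[a][b] = v` (in range under Pre_; out of range this is a no-op, Python raises — excluded by Pre_).
def pvSet2 (o : List (List Int)) (a b : Nat) (v : Int) : List (List Int) :=
  o.modify a (fun row => row.set b v)
-- the `for dj in range(grid_width)` loop of A
def pvRowA (g : List (List Int)) (H W i j di : Nat) (o : List (List Int)) : List (List Int) :=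
  (List.range W).foldl (fun o dj => pvSet2 o (H*i+di) (W*j+dj) (pvGet2 g di dj)) o
-- the `for di in range(grid_height)` loop of A
def pvBlockA (g : List (List Int)) (H W i j : Nat) (o : List (List Int)) : List (List Int) :=
  (List.range H).foldl (fun o di => pvRowA g H W i j di o) o

def tile_rule (input_grid : List (List Int)) : List (List Int) :=
  let H := input_grid.length
  let W := (input_grid.headD []).length
  let out := List.replicate (H*3) (List.replicate (W*3) (0:Int))
  (List.range H).foldl
    (fun out i => (List.range W).foldl
      (fun out j => if pvGet2 input_grid i j ≠ 0 then pvBlockA input_grid H W i j out else out) out)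
    out

-- ===== PORT B =====
def tile_rule_alt (input_grid : List (List Int)) : List (List Int) :=
  let H := input_grid.length
  let W := (input_grid.headD []).length
  (List.range (3*H)).map fun r =>
    (List.range (3*W)).map fun c =>
      if r / H < H ∧ c / W < W ∧ pvGet2 input_grid (r / H) (c / W) ≠ 0
      then pvGet2 input_grid (r % H) (c % W) else 0

-- ===== PRECONDITION & SPEC =====
-- Pre_ excludes exactly the inputs where A raises IndexError: the empty grid, a row shorter than
-- the first row, or a nonzero cell (within the first row's width) at row/column index ≥ 3,
-- whose block-copy writes past the 3H×3W output.
def Pre_tile_rule (input_grid : List (List Int)) : Prop :=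
  input_grid ≠ [] ∧
  (∀ row ∈ input_grid, (input_grid.headD []).length ≤ row.length) ∧
  (∀ i < input_grid.length, ∀ j < (input_grid.headD []).length,
      (input_grid.getD i []).getD j 0 ≠ 0 → i < 3 ∧ j < 3)
instance (input_grid : List (List Int)) : Decidable (Pre_tile_rule input_grid) := by
  unfold Pre_tile_rule; infer_instance
def pvWitness_tile_rule : List (List Int) := [[1, 0], [0, 2]]

def Spec_tile_rule (input_grid : List (List Int)) (out : List (List Int)) : Prop := out = tile_rule_alt input_grid
instance (input_grid : List (List Int)) (out : List (List Int)) : Decidable (Spec_tile_rule input_grid out) := by unfold Spec_tile_rule; infer_instance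

-- ===== CLAIM (what is proved, stated in full; the proofs are below) =====
def Claim_equal_tile_rule : Prop := ∀ (input_grid : List (List Int)), Dom_tile_rule input_grid → Pre_tile_rule input_grid → Spec_tile_rule input_grid (tile_rule input_grid)

-- ===== LEMMAS AND PROOFS =====

-- uniform shape of the output buffer
def pvShape (H W : Nat) (o : List (List Int)) : Prop :=
  o.length = H*3 ∧ ∀ row ∈ o, row.length = W*3

lemma pvShape_set2 (H W : Nat) (o : List (List Int)) (a b : Nat) (v : Int)
    (h : pvShape H W o) : pvShape H W (pvSet2 o a b v) := by
  obtain ⟨h1, h2⟩ := h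
  constructor
  · simpa [pvSet2] using h1
  · intro row hrow
    obtain ⟨k, hk, hget⟩ := List.getElem_of_mem hrow
    have h3 : (pvSet2 o a b v)[k]? = some row := by
      rw [List.getElem?_eq_getElem hk, hget]
    unfold pvSet2 at h3
    rw [List.getElem?_modify] at h3
    cases ho : o[k]? with
    | none => simp [ho] at h3
    | some x =>
      have hx : x.length = W*3 := h2 x (List.mem_of_getElem? ho)
      simp only [ho, Option.map_eq_map, Option.map_some, Option.some.injEq] at h3
      subst h3
      by_cases hak : a = k <;> simp [hak, hx]

lemma pvShape_foldl {α : Type} (H W : Nat) (f : List (List Int) → α → List (List Int))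
    (hf : ∀ o a, pvShape H W o → pvShape H W (f o a)) :
    ∀ (l : List α) (o : List (List Int)), pvShape H W o → pvShape H W (l.foldl f o) := by
  intro l
  induction l with
  | nil => intro o h; simpa using h
  | cons a t ih => intro o h; exact ih _ (hf o a h)

lemma pv_get2_set2 (H W : Nat) (o : List (List Int)) (hsh : pvShape H W o)
    (a b : Nat) (v : Int) (r c : Nat) :
    pvGet2 (pvSet2 o a b v) r c =
      if a = r ∧ b = c ∧ r < H*3 ∧ c < W*3 then v else pvGet2 o r c := by
  obtain ⟨h1, h2⟩ := hsh
  unfold pvGet2 pvSet2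
  simp only [List.getD_eq_getElem?_getD, List.getElem?_modify, Option.map_eq_map]
  cases hro : o[r]? with
  | none =>
    have hr : o.length ≤ r := List.getElem?_eq_none_iff.mp hro
    have hc : ¬ (a = r ∧ b = c ∧ r < H*3 ∧ c < W*3) := by
      rintro ⟨-, -, hlt, -⟩; omega
    simp [hro, hc]
  | some row =>
    have hrlen : row.length = W*3 := h2 row (List.mem_of_getElem? hro)
    have hrlt : r < o.length := by
      rcases List.getElem?_eq_some_iff.mp hro with ⟨h, -⟩; exact h
    simp only [hro, Option.map_some, Option.getD_some]
    by_cases har : a = r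
    · subst har
      simp only [if_pos rfl, List.getElem?_set]
      by_cases hbc : b = c
      · subst hbc
        by_cases hbl : b < row.length
        · have hc : a = a ∧ b = b ∧ a < H*3 ∧ b < W*3 := ⟨rfl, rfl, by omega, by omega⟩
          simp [hbl, hc]
        · have hc : ¬ (a = a ∧ b = b ∧ a < H*3 ∧ b < W*3) := by
            rintro ⟨-, -, -, h4⟩; omega
          have hset : row.set b v = row := List.set_eq_of_length_le (by omega)
          simp [hset, hc]
          intro _ hb
          exact absurd hb (by omega)
      · have hc : ¬ (a = a ∧ b = c ∧ a < H*3 ∧ c < W*3) := by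
          rintro ⟨-, h4, -, -⟩; exact hbc h4
        simp [hbc, hc]
    · have hc : ¬ (a = r ∧ b = c ∧ r < H*3 ∧ c < W*3) := by
        rintro ⟨h4, -⟩; exact har h4
      simp [har, hc]

lemma pv_get2_rowA (g : List (List Int)) (H W i j di : Nat)
    (hi : i < 3) (hj : j < 3) (hdi : di < H) (n : Nat) (hn : n ≤ W) :
    ∀ (o : List (List Int)), pvShape H W o → ∀ r c,
    pvGet2 ((List.range n).foldl (fun o dj => pvSet2 o (H*i+di) (W*j+dj) (pvGet2 g di dj)) o) r c =
      if r = H*i+di ∧ W*j ≤ c ∧ c < W*j+n then pvGet2 g di (c - W*j) else pvGet2 o r c := by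
  induction n with
  | zero =>
    intro o hsh r c
    have hc : ¬(r = H*i+di ∧ W*j ≤ c ∧ c < W*j+0) := by rintro ⟨-, h5, h6⟩; omega
    rw [List.range_zero, List.foldl_nil, if_neg hc]
  | succ n ih =>
    intro o hsh r c
    have hPi : H*i ≤ H*2 := Nat.mul_le_mul_left H (by omega)
    have hQj : W*j ≤ W*2 := Nat.mul_le_mul_left W (by omega)
    rw [List.range_succ, List.foldl_append, List.foldl_cons, List.foldl_nil]
    have hsh' : pvShape H W ((List.range n).foldl
        (fun o dj => pvSet2 o (H*i+di) (W*j+dj) (pvGet2 g di dj)) o) :=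
      pvShape_foldl H W _ (fun o dj h => pvShape_set2 H W o _ _ _ h) _ o hsh
    rw [pv_get2_set2 H W _ hsh', ih (by omega) o hsh r c]
    by_cases h1 : H*i+di = r ∧ W*j+n = c
    · have hA : H*i+di = r ∧ W*j+n = c ∧ r < H*3 ∧ c < W*3 :=
        ⟨h1.1, h1.2, by omega, by omega⟩
      have hR : r = H*i+di ∧ W*j ≤ c ∧ c < W*j+(n+1) := by omega
      have hdn : c - W*j = n := by omega
      rw [if_pos hA, if_pos hR, hdn]
    · have hA : ¬(H*i+di = r ∧ W*j+n = c ∧ r < H*3 ∧ c < W*3) := by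
        rintro ⟨x1, x2, -, -⟩; exact h1 ⟨x1, x2⟩
      rw [if_neg hA]
      by_cases h2 : r = H*i+di ∧ W*j ≤ c ∧ c < W*j+n
      · have h2' : r = H*i+di ∧ W*j ≤ c ∧ c < W*j+(n+1) := by omega
        simp [h2, h2']
      · have h2' : ¬(r = H*i+di ∧ W*j ≤ c ∧ c < W*j+(n+1)) := by
          rintro ⟨x1, x2, x3⟩
          exact h1 ⟨x1.symm, by omega⟩
        simp [h2, h2']

lemma pvShape_rowA (g : List (List Int)) (H W i j di : Nat) (o : List (List Int))
    (h : pvShape H W o) : pvShape H W (pvRowA g H W i j di o) := by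
  unfold pvRowA
  exact pvShape_foldl H W _ (fun o dj h' => pvShape_set2 H W o _ _ _ h') _ o h

lemma pv_get2_rowA' (g : List (List Int)) (H W i j di : Nat)
    (hi : i < 3) (hj : j < 3) (hdi : di < H)
    (o : List (List Int)) (hsh : pvShape H W o) (r c : Nat) :
    pvGet2 (pvRowA g H W i j di o) r c =
      if r = H*i+di ∧ W*j ≤ c ∧ c < W*j+W then pvGet2 g di (c - W*j) else pvGet2 o r c := by
  unfold pvRowA
  exact pv_get2_rowA g H W i j di hi hj hdi W (le_refl W) o hsh r c

lemma pv_get2_blockA (g : List (List Int)) (H W i j : Nat)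
    (hi : i < 3) (hj : j < 3) (m : Nat) (hm : m ≤ H) :
    ∀ (o : List (List Int)), pvShape H W o → ∀ r c,
    pvGet2 ((List.range m).foldl (fun o di => pvRowA g H W i j di o) o) r c =
      if H*i ≤ r ∧ r < H*i+m ∧ W*j ≤ c ∧ c < W*j+W
      then pvGet2 g (r - H*i) (c - W*j) else pvGet2 o r c := by
  induction m with
  | zero =>
    intro o hsh r c
    have hc : ¬(H*i ≤ r ∧ r < H*i+0 ∧ W*j ≤ c ∧ c < W*j+W) := by rintro ⟨h5, h6, -⟩; omega
    rw [List.range_zero, List.foldl_nil, if_neg hc]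
  | succ m ih =>
    intro o hsh r c
    rw [List.range_succ, List.foldl_append, List.foldl_cons, List.foldl_nil]
    have hsh' : pvShape H W ((List.range m).foldl (fun o di => pvRowA g H W i j di o) o) :=
      pvShape_foldl H W _ (fun o di h => pvShape_rowA g H W i j di o h) _ o hsh
    rw [pv_get2_rowA' g H W i j m hi hj (by omega) _ hsh' r c,
        ih (by omega) o hsh r c]
    by_cases h1 : r = H*i+m ∧ W*j ≤ c ∧ c < W*j+W
    · have hR : H*i ≤ r ∧ r < H*i+(m+1) ∧ W*j ≤ c ∧ c < W*j+W := by omega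
      have hdm : r - H*i = m := by omega
      simp [h1, hR, hdm]
    · rw [if_neg h1]
      by_cases h2 : H*i ≤ r ∧ r < H*i+m ∧ W*j ≤ c ∧ c < W*j+W
      · have h2' : H*i ≤ r ∧ r < H*i+(m+1) ∧ W*j ≤ c ∧ c < W*j+W := by omega
        simp [h2, h2']
      · have h2' : ¬(H*i ≤ r ∧ r < H*i+(m+1) ∧ W*j ≤ c ∧ c < W*j+W) := by
          rintro ⟨x1, x2, x3, x4⟩
          exact h1 ⟨by omega, x3, x4⟩
        simp [h2, h2']

lemma pvShape_blockA (g : List (List Int)) (H W i j : Nat) (o : List (List Int))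
    (h : pvShape H W o) : pvShape H W (pvBlockA g H W i j o) := by
  unfold pvBlockA
  exact pvShape_foldl H W _ (fun o di h' => pvShape_rowA g H W i j di o h') _ o h

lemma pv_get2_blockA' (g : List (List Int)) (H W i j : Nat)
    (hi : i < 3) (hj : j < 3)
    (o : List (List Int)) (hsh : pvShape H W o) (r c : Nat) :
    pvGet2 (pvBlockA g H W i j o) r c =
      if H*i ≤ r ∧ r < H*i+H ∧ W*j ≤ c ∧ c < W*j+W
      then pvGet2 g (r - H*i) (c - W*j) else pvGet2 o r c := by
  unfold pvBlockA
  exact pv_get2_blockA g H W i j hi hj H (le_refl H) o hsh r c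

lemma pv_get2_colLoop (g : List (List Int)) (H W i : Nat)
    (hP : ∀ i' < H, ∀ j' < W, pvGet2 g i' j' ≠ 0 → i' < 3 ∧ j' < 3)
    (hiH : i < H) (n : Nat) (hn : n ≤ W) :
    ∀ (o : List (List Int)), pvShape H W o → ∀ r c,
    pvGet2 ((List.range n).foldl
        (fun o j => if pvGet2 g i j ≠ 0 then pvBlockA g H W i j o else o) o) r c =
      if H*i ≤ r ∧ r < H*i+H ∧ c < W*n ∧ pvGet2 g i (c / W) ≠ 0
      then pvGet2 g (r - H*i) (c % W) else pvGet2 o r c := by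
  induction n with
  | zero =>
    intro o hsh r c
    have hc : ¬(H*i ≤ r ∧ r < H*i+H ∧ c < W*0 ∧ pvGet2 g i (c / W) ≠ 0) := by
      rintro ⟨-, -, h5, -⟩; omega
    rw [List.range_zero, List.foldl_nil, if_neg hc]
  | succ n ih =>
    intro o hsh r c
    have hW : 0 < W := by omega
    have e2 : W*(n+1) = W*n + W := by ring
    have hdm := Nat.div_add_mod c W
    have hml : c % W < W := Nat.mod_lt _ hW
    rw [List.range_succ, List.foldl_append, List.foldl_cons, List.foldl_nil]
    have hsh' : pvShape H W ((List.range n).foldl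
        (fun o j => if pvGet2 g i j ≠ 0 then pvBlockA g H W i j o else o) o) := by
      refine pvShape_foldl H W _ (fun o j h => ?_) _ o hsh
      dsimp only
      split
      · exact pvShape_blockA g H W i j o h
      · exact h
    by_cases hnz : pvGet2 g i n ≠ 0
    · rw [if_pos hnz]
      obtain ⟨hi3, hn3⟩ := hP i hiH n (by omega) hnz
      rw [pv_get2_blockA' g H W i n hi3 hn3 _ hsh' r c, ih (by omega) o hsh r c]
      by_cases hb : H*i ≤ r ∧ r < H*i+H ∧ W*n ≤ c ∧ c < W*n+W
      · have hdiv : c / W = n := by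
          refine Nat.div_eq_of_lt_le (by rw [Nat.mul_comm]; exact hb.2.2.1) ?_
          have e3 : (n+1) * W = W*n + W := by ring
          omega
        have hmod : c % W = c - W*n := by
          rw [hdiv] at hdm; omega
        have hnew : H*i ≤ r ∧ r < H*i+H ∧ c < W*(n+1) ∧ pvGet2 g i (c / W) ≠ 0 := by
          refine ⟨hb.1, hb.2.1, by omega, ?_⟩
          rw [hdiv]; exact hnz
        rw [if_pos hb, if_pos hnew, hmod]
      · rw [if_neg hb]
        by_cases ho2 : H*i ≤ r ∧ r < H*i+H ∧ c < W*n ∧ pvGet2 g i (c / W) ≠ 0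
        · have hnew : H*i ≤ r ∧ r < H*i+H ∧ c < W*(n+1) ∧ pvGet2 g i (c / W) ≠ 0 :=
            ⟨ho2.1, ho2.2.1, by omega, ho2.2.2.2⟩
          rw [if_pos ho2, if_pos hnew]
        · have hnew : ¬(H*i ≤ r ∧ r < H*i+H ∧ c < W*(n+1) ∧ pvGet2 g i (c / W) ≠ 0) := by
            rintro ⟨x1, x2, x3, x4⟩
            by_cases hcw : c < W*n
            · exact ho2 ⟨x1, x2, hcw, x4⟩
            · exact hb ⟨x1, x2, by omega, by omega⟩
          rw [if_neg ho2, if_neg hnew]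
    · rw [if_neg hnz, ih (by omega) o hsh r c]
      have hnz : pvGet2 g i n = 0 := not_not.mp hnz
      by_cases ho2 : H*i ≤ r ∧ r < H*i+H ∧ c < W*n ∧ pvGet2 g i (c / W) ≠ 0
      · have hnew : H*i ≤ r ∧ r < H*i+H ∧ c < W*(n+1) ∧ pvGet2 g i (c / W) ≠ 0 :=
          ⟨ho2.1, ho2.2.1, by omega, ho2.2.2.2⟩
        rw [if_pos ho2, if_pos hnew]
      · have hnew : ¬(H*i ≤ r ∧ r < H*i+H ∧ c < W*(n+1) ∧ pvGet2 g i (c / W) ≠ 0) := by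
          rintro ⟨x1, x2, x3, x4⟩
          by_cases hcw : c < W*n
          · exact ho2 ⟨x1, x2, hcw, x4⟩
          · have hdiv : c / W = n := by
              refine Nat.div_eq_of_lt_le (by rw [Nat.mul_comm]; omega) ?_
              have e3 : (n+1) * W = W*n + W := by ring
              omega
            rw [hdiv] at x4
            exact x4 hnz
        rw [if_neg ho2, if_neg hnew]

lemma pv_get2_full (g : List (List Int)) (H W : Nat) (hH : 0 < H)
    (hP : ∀ i' < H, ∀ j' < W, pvGet2 g i' j' ≠ 0 → i' < 3 ∧ j' < 3)
    (m : Nat) (hm : m ≤ H) :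
    ∀ (o : List (List Int)), pvShape H W o → ∀ r c,
    pvGet2 ((List.range m).foldl
        (fun o i => (List.range W).foldl
          (fun o j => if pvGet2 g i j ≠ 0 then pvBlockA g H W i j o else o) o) o) r c =
      if r < H*m ∧ c < W*W ∧ pvGet2 g (r / H) (c / W) ≠ 0
      then pvGet2 g (r % H) (c % W) else pvGet2 o r c := by
  induction m with
  | zero =>
    intro o hsh r c
    have hc : ¬(r < H*0 ∧ c < W*W ∧ pvGet2 g (r / H) (c / W) ≠ 0) := by
      rintro ⟨h5, -, -⟩; omega
    rw [List.range_zero, List.foldl_nil, if_neg hc]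
  | succ m ih =>
    intro o hsh r c
    have e2 : H*(m+1) = H*m + H := by ring
    have hdm := Nat.div_add_mod r H
    have hml : r % H < H := Nat.mod_lt _ hH
    rw [List.range_succ, List.foldl_append, List.foldl_cons, List.foldl_nil]
    have hsh' : pvShape H W ((List.range m).foldl
        (fun o i => (List.range W).foldl
          (fun o j => if pvGet2 g i j ≠ 0 then pvBlockA g H W i j o else o) o) o) := by
      refine pvShape_foldl H W _ (fun o i h => ?_) _ o hsh
      refine pvShape_foldl H W _ (fun o j h' => ?_) _ o h
      dsimp only
      split
      · exact pvShape_blockA g H W i j o h'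
      · exact h'
    rw [pv_get2_colLoop g H W m hP (by omega) W (le_refl W) _ hsh' r c,
        ih (by omega) o hsh r c]
    by_cases hb : H*m ≤ r ∧ r < H*m+H ∧ c < W*W ∧ pvGet2 g m (c / W) ≠ 0
    · have hdiv : r / H = m := by
        refine Nat.div_eq_of_lt_le (by rw [Nat.mul_comm]; exact hb.1) ?_
        have e3 : (m+1) * H = H*m + H := by ring
        omega
      have hmod : r % H = r - H*m := by
        rw [hdiv] at hdm; omega
      have hnew : r < H*(m+1) ∧ c < W*W ∧ pvGet2 g (r / H) (c / W) ≠ 0 := by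
        refine ⟨by omega, hb.2.2.1, ?_⟩
        rw [hdiv]; exact hb.2.2.2
      rw [if_pos hb, if_pos hnew, hmod]
    · rw [if_neg hb]
      by_cases ho2 : r < H*m ∧ c < W*W ∧ pvGet2 g (r / H) (c / W) ≠ 0
      · have hnew : r < H*(m+1) ∧ c < W*W ∧ pvGet2 g (r / H) (c / W) ≠ 0 :=
          ⟨by omega, ho2.2.1, ho2.2.2⟩
        rw [if_pos ho2, if_pos hnew]
      · have hnew : ¬(r < H*(m+1) ∧ c < W*W ∧ pvGet2 g (r / H) (c / W) ≠ 0) := by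
          rintro ⟨x1, x2, x3⟩
          by_cases hrw : r < H*m
          · exact ho2 ⟨hrw, x2, x3⟩
          · have hdiv : r / H = m := by
              refine Nat.div_eq_of_lt_le (by rw [Nat.mul_comm]; omega) ?_
              have e3 : (m+1) * H = H*m + H := by ring
              omega
            rw [hdiv] at x3
            exact hb ⟨by omega, by omega, x2, x3⟩
        rw [if_neg ho2, if_neg hnew]

lemma pvGet2_eq_getElem (o : List (List Int)) (r c : Nat)
    (hr : r < o.length) (hc : c < (o[r]'hr).length) :
    pvGet2 o r c = (o[r]'hr)[c]'hc := by
  unfold pvGet2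
  rw [List.getD_eq_getElem o [] hr, List.getD_eq_getElem _ 0 hc]

lemma pv_get2_replicate (a b r c : Nat) :
    pvGet2 (List.replicate a (List.replicate b (0:Int))) r c = 0 := by
  unfold pvGet2
  simp only [List.getD_eq_getElem?_getD, List.getElem?_replicate]
  by_cases h : r < a
  · simp only [h, if_true]
    by_cases h2 : c < b <;> simp [h2]
  · simp [h]

-- ===== VERDICT (by name: the statement is the Claim_ definition above) =====
theorem tile_rule_spec : Claim_equal_tile_rule := by
  intro g _ hpre
  obtain ⟨hne, hrows, hP'⟩ := hpre
  unfold Spec_tile_rule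
  have hH : 0 < g.length := List.length_pos_of_ne_nil hne
  have hP : ∀ i' < g.length, ∀ j' < (g.headD []).length,
      pvGet2 g i' j' ≠ 0 → i' < 3 ∧ j' < 3 :=
    fun i hi j hj h => hP' i hi j hj h
  simp only [tile_rule, tile_rule_alt]
  have hsh0 : pvShape g.length (g.headD []).length
      (List.replicate (g.length*3) (List.replicate ((g.headD []).length*3) (0:Int))) := by
    refine ⟨by simp, fun row hrow => ?_⟩
    rw [List.eq_of_mem_replicate hrow]
    simp
  have hshF : pvShape g.length (g.headD []).length
      ((List.range g.length).foldl
        (fun out i => (List.range (g.headD []).length).foldl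
          (fun out j => if pvGet2 g i j ≠ 0 then pvBlockA g g.length (g.headD []).length i j out else out) out)
        (List.replicate (g.length*3) (List.replicate ((g.headD []).length*3) (0:Int)))) := by
    refine pvShape_foldl _ _ _ (fun o i h => ?_) _ _ hsh0
    refine pvShape_foldl _ _ _ (fun o j h' => ?_) _ o h
    dsimp only
    split
    · exact pvShape_blockA g _ _ i j o h'
    · exact h'
  apply List.ext_getElem
  · rw [hshF.1]
    simp only [List.length_map, List.length_range]
    omega
  · intro r hr1 hr2
    apply List.ext_getElem
    · have hmem := List.getElem_mem hr1
      rw [hshF.2 _ hmem]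
      simp only [List.getElem_map, List.getElem_range, List.length_map, List.length_range]
      omega
    · intro c hc1 hc2
      rw [← pvGet2_eq_getElem _ r c hr1 hc1]
      rw [pv_get2_full g g.length (g.headD []).length hH hP g.length (le_refl _) _ hsh0 r c]
      rw [pv_get2_replicate]
      have hc3 : c < 3 * (g.headD []).length := by
        revert hc2
        simp only [List.getElem_map, List.getElem_range, List.length_map, List.length_range]
        intro h; exact h
      have hW : 0 < (g.headD []).length := by omega
      simp only [List.getElem_map, List.getElem_range]
      simp only [Nat.div_lt_iff_lt_mul hH, Nat.div_lt_iff_lt_mul hW]
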